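-- pv_equiv track=rewrite | github.com/corozco7/Queens_Attack | Queen_Attack.py | down_right
-- ===== SOURCE A (Python) =====
-- def down_right(queen_position, board_length, obstacles):
-- 	"""Returns the amount of squares that the queen can move to the right diagonal down, stop counting when an obstacle is found."""
-- 	count = 0
-- 	rq = queen_position[0] - 1
-- 	cq = queen_position[1] + 1
-- 	while rq >= 1 and cq <= board_length:
-- 		if _isObstacles(rq, cq, obstacles):
-- 			rq -= 1
-- 			cq += 1
-- 			count += 1
-- 		else:
-- 			break
-- 	return count
--
-- def _isObstacles(rq, cq, obstacles):
-- 	"""Validate if an obstacle is found"""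
-- 	var = True
-- 	compare = [rq, cq]
-- 	for x in obstacles:
-- 		if compare == x:
-- 			var = False
-- 			break
-- 	return var
-- ===== SOURCE B (Python) =====
-- def down_right(queen_position, board_length, obstacles):
--     """Returns the amount of squares that the queen can move to the right diagonal down, stop counting when an obstacle is found."""
--     q0 = queen_position[0]
--     q1 = queen_position[1]
--     maxsteps = min(q0 - 1, board_length - q1)
--     if maxsteps < 0:
--         maxsteps = 0
--     best = None
--     for x in obstacles:
--         if len(x) == 2 and x[0] + x[1] == q0 + q1:
--             step = q0 - x[0]
--             if 1 <= step <= maxsteps and (best is None or step < best):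
--                 best = step
--     return maxsteps if best is None else best - 1
-- ===== Notes on version B (the rewrite author's own statement) =====
-- stated objective: simpler
-- what changed: Replaces A's square-by-square walk along the diagonal (with a membership scan per square) by a closed-form diagonal length plus a single min-tracking pass over the obstacle list.
import Mathlib
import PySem

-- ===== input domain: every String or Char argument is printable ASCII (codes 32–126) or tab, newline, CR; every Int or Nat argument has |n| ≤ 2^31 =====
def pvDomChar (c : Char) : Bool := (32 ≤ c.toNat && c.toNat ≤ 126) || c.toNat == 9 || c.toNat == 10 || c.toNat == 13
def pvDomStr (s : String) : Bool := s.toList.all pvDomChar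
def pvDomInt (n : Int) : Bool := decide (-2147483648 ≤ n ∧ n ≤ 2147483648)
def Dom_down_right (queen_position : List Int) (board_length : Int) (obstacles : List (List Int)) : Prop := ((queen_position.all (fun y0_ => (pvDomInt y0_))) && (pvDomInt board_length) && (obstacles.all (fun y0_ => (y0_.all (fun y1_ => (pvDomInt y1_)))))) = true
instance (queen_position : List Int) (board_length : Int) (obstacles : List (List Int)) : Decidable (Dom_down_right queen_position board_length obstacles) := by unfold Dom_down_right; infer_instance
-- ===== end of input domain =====

-- B replaces A's step-by-step diagonal walk with a closed-form diagonal length plus a single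
-- min-tracking pass over the obstacles (objective: simpler / alternative control flow).

-- ===== PORT A =====
-- A's helper `_isObstacles` (returns true when (rq,cq) is FREE, i.e. no obstacle matches)
def isObstaclesA (rq cq : Int) (obstacles : List (List Int)) : Bool :=
  match obstacles with
  | [] => true
  | x :: xs => if [rq, cq] = x then false else isObstaclesA rq cq xs

-- A's while loop, state (rq, cq, count)
def drLoop (board_length : Int) (obstacles : List (List Int)) (rq cq count : Int) : Int :=
  if h : 1 ≤ rq ∧ cq ≤ board_length then
    if isObstaclesA rq cq obstacles then
      drLoop board_length obstacles (rq - 1) (cq + 1) (count + 1)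
    else count
  else count
termination_by rq.toNat
decreasing_by omega

def down_right (queen_position : List Int) (board_length : Int) (obstacles : List (List Int)) : Int :=
  let rq := (PySem.List.pyGet? queen_position 0).getD 0 - 1
  let cq := (PySem.List.pyGet? queen_position 1).getD 0 + 1
  drLoop board_length obstacles rq cq 0

-- ===== PORT B =====
def down_right_alt (queen_position : List Int) (board_length : Int) (obstacles : List (List Int)) : Int :=
  let q0 := (PySem.List.pyGet? queen_position 0).getD 0
  let q1 := (PySem.List.pyGet? queen_position 1).getD 0
  let m := min (q0 - 1) (board_length - q1)
  let maxsteps := if m < 0 then 0 else m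
  let best : Option Int := obstacles.foldl (fun best x =>
    if x.length = 2 ∧ (PySem.List.pyGet? x 0).getD 0 + (PySem.List.pyGet? x 1).getD 0 = q0 + q1 then
      let step := q0 - (PySem.List.pyGet? x 0).getD 0
      if 1 ≤ step ∧ step ≤ maxsteps then
        match best with
        | none => some step
        | some b => if step < b then some step else best
      else best
    else best) none
  match best with
  | none => maxsteps
  | some b => b - 1

-- ===== PRECONDITION & SPEC =====
-- A raises IndexError when queen_position has fewer than 2 entries; Pre_ requires length ≥ 2.
def Pre_down_right (queen_position : List Int) (board_length : Int) (obstacles : List (List Int)) : Prop :=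
  2 ≤ queen_position.length
instance (queen_position : List Int) (board_length : Int) (obstacles : List (List Int)) : Decidable (Pre_down_right queen_position board_length obstacles) := by unfold Pre_down_right; infer_instance

def pvWitness_down_right : List Int × Int × List (List Int) := ([4, 1], 6, [[2, 3]])

def Spec_down_right (queen_position : List Int) (board_length : Int) (obstacles : List (List Int)) (out : Int) : Prop := out = down_right_alt queen_position board_length obstacles
instance (queen_position : List Int) (board_length : Int) (obstacles : List (List Int)) (out : Int) : Decidable (Spec_down_right queen_position board_length obstacles out) := by unfold Spec_down_right; infer_instance

-- ===== CLAIM (what is proved, stated in full; the proofs are below) =====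
def Claim_equal_down_right : Prop := ∀ (queen_position : List Int) (board_length : Int) (obstacles : List (List Int)), Dom_down_right queen_position board_length obstacles → Pre_down_right queen_position board_length obstacles → Spec_down_right queen_position board_length obstacles (down_right queen_position board_length obstacles)

-- ===== LEMMAS AND PROOFS =====

-- proof-side: minimum qualifying step ≥ c along the diagonal of (q0,q1), bounded by ms
def minQ (q0 q1 ms c : Int) (obstacles : List (List Int)) : Option Int :=
  match obstacles with
  | [] => none
  | x :: xs =>
    let r := (PySem.List.pyGet? x 0).getD 0
    if x.length = 2 ∧ r + (PySem.List.pyGet? x 1).getD 0 = q0 + q1 ∧ c ≤ q0 - r ∧ q0 - r ≤ ms then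
      match minQ q0 q1 ms c xs with
      | none => some (q0 - r)
      | some b => some (min (q0 - r) b)
    else minQ q0 q1 ms c xs

lemma isObstaclesA_eq_true_iff (rq cq : Int) (obs : List (List Int)) :
    isObstaclesA rq cq obs = true ↔ [rq, cq] ∉ obs := by
  induction obs with
  | nil => simp [isObstaclesA]
  | cons x xs ih =>
    rw [isObstaclesA]
    split_ifs with h
    · simp [h]
    · rw [ih]
      simp [List.mem_cons, h]

lemma minQ_bounds (q0 q1 ms c : Int) (obs : List (List Int)) :
    ∀ k : Int, minQ q0 q1 ms c obs = some k → c ≤ k ∧ k ≤ ms := by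
  induction obs with
  | nil => intro k h; simp only [minQ] at h; exact (Option.some_ne_none k h.symm).elim
  | cons x xs ih =>
    intro k h
    rw [minQ] at h
    split_ifs at h with hq
    · rcases hcase : minQ q0 q1 ms c xs with _ | b <;> rw [hcase] at h <;>
        simp only [Option.some.injEq] at h
      · omega
      · have := ih b hcase; omega
    · exact ih k h

lemma minQ_none_of_gt (q0 q1 ms c : Int) (obs : List (List Int)) (h : ms < c) :
    minQ q0 q1 ms c obs = none := by
  rcases hc : minQ q0 q1 ms c obs with _ | k
  · rfl
  · have := minQ_bounds q0 q1 ms c obs k hc; omega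

lemma minQ_mem (q0 q1 ms c : Int) (obs : List (List Int))
    (hmem : [q0 - c, q1 + c] ∈ obs) (hle : c ≤ ms) :
    minQ q0 q1 ms c obs = some c := by
  induction obs with
  | nil => simp at hmem
  | cons x xs ih =>
    rw [minQ]
    rcases List.mem_cons.mp hmem with hx | hx
    · subst hx
      have hget : (PySem.List.pyGet? [q0 - c, q1 + c] 0).getD 0 = q0 - c := by
        simp [PySem.List.pyGet?, PySem.List.pyIdx?]
      have hget1 : (PySem.List.pyGet? [q0 - c, q1 + c] 1).getD 0 = q1 + c := by
        simp [PySem.List.pyGet?, PySem.List.pyIdx?]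
      have hq : ([q0 - c, q1 + c] : List Int).length = 2 ∧
          (PySem.List.pyGet? [q0 - c, q1 + c] 0).getD 0 +
            (PySem.List.pyGet? [q0 - c, q1 + c] 1).getD 0 = q0 + q1 ∧
          c ≤ q0 - (PySem.List.pyGet? [q0 - c, q1 + c] 0).getD 0 ∧
          q0 - (PySem.List.pyGet? [q0 - c, q1 + c] 0).getD 0 ≤ ms := by
        refine ⟨rfl, ?_, ?_, ?_⟩ <;> rw [hget] <;> try rw [hget1]
        · ring
        · omega
        · omega
      rw [if_pos hq]
      rcases hcase : minQ q0 q1 ms c xs with _ | b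
      · rw [hget]
        show some (q0 - (q0 - c)) = some c
        congr 1
        ring
      · have := minQ_bounds q0 q1 ms c xs b hcase
        rw [hget]
        show some (min (q0 - (q0 - c)) b) = some c
        congr 1
        omega
    · have hrec := ih hx
      rw [hrec]
      split_ifs with hq
      · have : c ≤ q0 - (PySem.List.pyGet? x 0).getD 0 := hq.2.2.1
        simp only [Option.some.injEq]
        omega
      · rfl

lemma len_two_eq (x : List Int) (h2 : x.length = 2)
    (h0 : (PySem.List.pyGet? x 0).getD 0 = a) (h1 : (PySem.List.pyGet? x 1).getD 0 = b) :
    x = [a, b] := by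
  match x, h2 with
  | [u, v], _ =>
    simp [PySem.List.pyGet?, PySem.List.pyIdx?] at h0 h1
    simp [h0, h1]

lemma minQ_skip (q0 q1 ms c : Int) (obs : List (List Int))
    (hfree : [q0 - c, q1 + c] ∉ obs) :
    minQ q0 q1 ms c obs = minQ q0 q1 ms (c + 1) obs := by
  induction obs with
  | nil => rfl
  | cons x xs ih =>
    have hx : x ≠ [q0 - c, q1 + c] := by intro h; exact hfree (by simp [h])
    have hxs : [q0 - c, q1 + c] ∉ xs := fun h => hfree (List.mem_cons_of_mem _ h)
    have hrec := ih hxs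
    rw [minQ, minQ, hrec]
    have hiff : (x.length = 2 ∧ (PySem.List.pyGet? x 0).getD 0 + (PySem.List.pyGet? x 1).getD 0 = q0 + q1 ∧
          c ≤ q0 - (PySem.List.pyGet? x 0).getD 0 ∧ q0 - (PySem.List.pyGet? x 0).getD 0 ≤ ms) ↔
        (x.length = 2 ∧ (PySem.List.pyGet? x 0).getD 0 + (PySem.List.pyGet? x 1).getD 0 = q0 + q1 ∧
          c + 1 ≤ q0 - (PySem.List.pyGet? x 0).getD 0 ∧ q0 - (PySem.List.pyGet? x 0).getD 0 ≤ ms) := by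
      constructor
      · rintro ⟨h2, hsum, hlo, hhi⟩
        refine ⟨h2, hsum, ?_, hhi⟩
        rcases lt_or_eq_of_le hlo with h | h
        · omega
        · exfalso
          exact hx (len_two_eq x h2 (by omega) (by omega))
      · rintro ⟨h2, hsum, hlo, hhi⟩
        exact ⟨h2, hsum, by omega, hhi⟩
    by_cases hq : x.length = 2 ∧ (PySem.List.pyGet? x 0).getD 0 + (PySem.List.pyGet? x 1).getD 0 = q0 + q1 ∧
        c ≤ q0 - (PySem.List.pyGet? x 0).getD 0 ∧ q0 - (PySem.List.pyGet? x 0).getD 0 ≤ ms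
    · rw [if_pos hq, if_pos (hiff.mp hq)]
    · rw [if_neg hq, if_neg (fun h => hq (hiff.mpr h))]

-- core: the walk equals the minQ characterisation, for any remaining start step c
lemma drLoop_char (bl q0 q1 ms : Int) (obs : List (List Int))
    (hms : ms = (if min (q0 - 1) (bl - q1) < 0 then 0 else min (q0 - 1) (bl - q1))) :
    ∀ (n : Nat) (c count : Int), 1 ≤ c → c ≤ ms + 1 → (ms + 1 - c).toNat = n →
    drLoop bl obs (q0 - c) (q1 + c) count =
      count + (match minQ q0 q1 ms c obs with
               | none => ms - c + 1
               | some k => k - c) := by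
  intro n
  induction n with
  | zero =>
    intro c count hc1 hc2 hn
    have hc : c = ms + 1 := by omega
    have hnc : ¬ (1 ≤ q0 - c ∧ q1 + c ≤ bl) := by
      have h' := hms
      by_cases hneg : min (q0 - 1) (bl - q1) < 0
      · rw [if_pos hneg] at h'; omega
      · rw [if_neg hneg] at h'; omega
    rw [drLoop, dif_neg hnc]
    rw [minQ_none_of_gt q0 q1 ms c obs (by omega)]
    show count = count + (ms - c + 1)
    omega
  | succ n ih =>
    intro c count hc1 hc2 hn
    have hcms : c ≤ ms := by omega
    have hm0 : 0 ≤ ms := by rw [hms]; split <;> omega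
    have hcond : 1 ≤ q0 - c ∧ q1 + c ≤ bl := by
      have h' := hms
      by_cases hneg : min (q0 - 1) (bl - q1) < 0
      · rw [if_pos hneg] at h'; omega
      · rw [if_neg hneg] at h'; omega
    rw [drLoop, dif_pos hcond]
    by_cases hfree : isObstaclesA (q0 - c) (q1 + c) obs = true
    · rw [if_pos hfree]
      have hmem := (isObstaclesA_eq_true_iff _ _ _).mp hfree
      have hskip := minQ_skip q0 q1 ms c obs hmem
      have : q0 - c - 1 = q0 - (c + 1) := by ring
      rw [this]
      have : q1 + c + 1 = q1 + (c + 1) := by ring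
      rw [this]
      rw [ih (c + 1) (count + 1) (by omega) (by omega) (by omega)]
      rw [hskip]
      rcases minQ q0 q1 ms (c + 1) obs with _ | k <;> simp <;> ring
    · rw [if_neg hfree]
      have hmem : [q0 - c, q1 + c] ∈ obs := by
        by_contra h
        exact hfree ((isObstaclesA_eq_true_iff _ _ _).mpr h)
      rw [minQ_mem q0 q1 ms c obs hmem hcms]
      simp

-- B's fold computes minQ at threshold 1
lemma foldB_eq_minQ (q0 q1 ms : Int) (obs : List (List Int)) :
    ∀ acc : Option Int,
    obs.foldl (fun best x =>
      if x.length = 2 ∧ (PySem.List.pyGet? x 0).getD 0 + (PySem.List.pyGet? x 1).getD 0 = q0 + q1 then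
        let step := q0 - (PySem.List.pyGet? x 0).getD 0
        if 1 ≤ step ∧ step ≤ ms then
          match best with
          | none => some step
          | some b => if step < b then some step else best
        else best
      else best) acc =
    (match acc, minQ q0 q1 ms 1 obs with
     | none, r => r
     | some a, none => some a
     | some a, some b => some (min a b)) := by
  induction obs with
  | nil => intro acc; cases acc <;> rfl
  | cons x xs ih =>
    intro acc
    rw [List.foldl_cons, ih, minQ]
    simp only []
    by_cases h2 : x.length = 2 ∧ (PySem.List.pyGet? x 0).getD 0 + (PySem.List.pyGet? x 1).getD 0 = q0 + q1
    · by_cases hb : 1 ≤ q0 - (PySem.List.pyGet? x 0).getD 0 ∧ q0 - (PySem.List.pyGet? x 0).getD 0 ≤ ms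
      · have hq4 : x.length = 2 ∧ (PySem.List.pyGet? x 0).getD 0 + (PySem.List.pyGet? x 1).getD 0 = q0 + q1 ∧
            1 ≤ q0 - (PySem.List.pyGet? x 0).getD 0 ∧ q0 - (PySem.List.pyGet? x 0).getD 0 ≤ ms :=
          ⟨h2.1, h2.2, hb⟩
        rw [if_pos h2, if_pos hb, if_pos hq4]
        cases acc <;> rcases minQ q0 q1 ms 1 xs with _ | b <;> simp only [] <;>
          split_ifs <;> (first | rfl | (simp only [Option.some.injEq]; omega))
      · have hq4 : ¬ (x.length = 2 ∧ (PySem.List.pyGet? x 0).getD 0 + (PySem.List.pyGet? x 1).getD 0 = q0 + q1 ∧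
            1 ≤ q0 - (PySem.List.pyGet? x 0).getD 0 ∧ q0 - (PySem.List.pyGet? x 0).getD 0 ≤ ms) :=
          fun h => hb ⟨h.2.2.1, h.2.2.2⟩
        rw [if_pos h2, if_neg hb, if_neg hq4]
    · have hq4 : ¬ (x.length = 2 ∧ (PySem.List.pyGet? x 0).getD 0 + (PySem.List.pyGet? x 1).getD 0 = q0 + q1 ∧
          1 ≤ q0 - (PySem.List.pyGet? x 0).getD 0 ∧ q0 - (PySem.List.pyGet? x 0).getD 0 ≤ ms) :=
        fun h => h2 ⟨h.1, h.2.1⟩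
      rw [if_neg h2, if_neg hq4]

-- ===== VERDICT (by name: the statement is the Claim_ definition above) =====
theorem down_right_spec : Claim_equal_down_right := by
  intro qp bl obs _hdom _hpre
  unfold Spec_down_right
  simp only [down_right, down_right_alt]
  set q0 := (PySem.List.pyGet? qp 0).getD 0 with hq0
  set q1 := (PySem.List.pyGet? qp 1).getD 0 with hq1
  set ms := (if min (q0 - 1) (bl - q1) < 0 then 0 else min (q0 - 1) (bl - q1)) with hms
  have hm0 : 0 ≤ ms := by rw [hms]; split <;> omega
  rw [drLoop_char bl q0 q1 ms obs hms (ms + 1 - 1).toNat 1 0 (by omega) (by omega) rfl]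
  rw [foldB_eq_minQ q0 q1 ms obs none]
  rcases minQ q0 q1 ms 1 obs with _ | k <;> simp
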